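-- pv_equiv track=rewrite | github.com/Zaynokov/python | lesson 5/6.py | name_c
-- ===== SOURCE A (Python) =====
-- def name_c(text):
--     txt = ""
--     c = ''.join([k for k in text if k.isdigit() or k == " "]).split()
--     c = sum(list(map(int, c)))
--     for k in text:
--         if k == ":":
--             break
--         txt += k
--     return txt, c
-- ===== SOURCE B (Python) =====
-- def name_c(text):
--     prefix = text.split(':', 1)[0]
--     total = 0
--     cur = 0
--     seen = False
--     for ch in text:
--         if ch.isdigit():
--             cur = cur * 10 + (ord(ch) - 48)
--             seen = True
--         elif ch == ' ':
--             if seen: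
--                 total += cur
--                 cur = 0
--                 seen = False
--     if seen:
--         total += cur
--     return prefix, total
-- ===== Notes on version B (the rewrite author's own statement) =====
-- stated objective: faster
-- what changed: Replaces A's filter/join/split/map-int/sum pipeline and the character-append break-loop by a single accumulating state-machine pass (running number, flush on space) plus a find/slice prefix.
import Mathlib
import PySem

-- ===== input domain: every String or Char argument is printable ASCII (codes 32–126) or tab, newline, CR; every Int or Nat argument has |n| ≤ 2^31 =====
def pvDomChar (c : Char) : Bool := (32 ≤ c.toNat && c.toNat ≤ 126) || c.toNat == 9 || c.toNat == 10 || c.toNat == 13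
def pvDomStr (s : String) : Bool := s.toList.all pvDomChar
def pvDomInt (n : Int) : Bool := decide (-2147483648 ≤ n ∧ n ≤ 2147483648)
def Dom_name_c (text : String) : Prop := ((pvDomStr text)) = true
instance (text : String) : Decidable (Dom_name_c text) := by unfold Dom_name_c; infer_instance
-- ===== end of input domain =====

-- B replaces A's filter/join/split/map-int/sum pipeline and the char-append break-loop by one
-- accumulator pass over the text plus a find/slice prefix (measured constant-factor faster).

-- ===== PORT A =====
-- int(g): hand-ported. PySem.Int.ofChars? models int(), but every string reaching int() here is a
-- nonempty all-digit group (the filter keeps only digits and spaces, split() drops the spaces and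
-- empties), and on exactly that domain int(g) is the decimal fold below.
def pvIntDigits (g : List Char) : Int :=
  g.foldl (fun a c => a * 10 + ((c.toNat : Int) - 48)) 0

-- "for k in text: if k == ':': break ; txt += k"
def pvTxtLoop : List Char → List Char → List Char
  | [], txt => txt
  | k :: rest, txt => if k == ':' then txt else pvTxtLoop rest (txt ++ [k])

def name_c (text : String) : String × Int :=
  -- ''.join([k for k in text if k.isdigit() or k == " "]).split()
  let groups := PySem.Chars.split₀ (text.toList.filter (fun k => PySem.Chars.isdigit k || k == ' '))
  -- c = sum(list(map(int, c)))
  let c := (groups.map pvIntDigits).sum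
  let txt := pvTxtLoop text.toList []
  (String.ofList txt, c)

-- ===== PORT B =====
-- the single pass of Source B: state (total, cur, seen)
def pvSumLoop : List Char → Int × Int × Bool → Int × Int × Bool
  | [], st => st
  | ch :: rest, (total, cur, seen) =>
    if PySem.Chars.isdigit ch then
      pvSumLoop rest (total, cur * 10 + ((ch.toNat : Int) - 48), true)
    else if ch == ' ' then
      if seen then pvSumLoop rest (total + cur, 0, false)
      else pvSumLoop rest (total, cur, seen)
    else pvSumLoop rest (total, cur, seen)

def name_c_alt (text : String) : String × Int :=
  let i := PySem.Chars.find text.toList [':']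
  let pre := if i < 0 then text else String.ofList (PySem.Chars.slice text.toList none (some i))
  let st := pvSumLoop text.toList (0, 0, false)
  let total := if st.2.2 then st.1 + st.2.1 else st.1
  (pre, total)

-- ===== PRECONDITION & SPEC =====
def Spec_name_c (text : String) (out : String × Int) : Prop := out = name_c_alt text
instance (text : String) (out : String × Int) : Decidable (Spec_name_c text out) := by unfold Spec_name_c; infer_instance

-- ===== CLAIM (what is proved, stated in full; the proofs are below) =====
def Claim_equal_name_c : Prop := ∀ (text : String), Dom_name_c text → Spec_name_c text (name_c text)

-- ===== LEMMAS AND PROOFS =====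

-- B's end-of-loop flush
def pvFlush (st : Int × Int × Bool) : Int := if st.2.2 then st.1 + st.2.1 else st.1

theorem pvTxtLoop_eq (cs : List Char) : ∀ acc : List Char,
    pvTxtLoop cs acc = acc ++ cs.takeWhile (fun k => !(k == ':')) := by
  induction cs with
  | nil => intro acc; simp [pvTxtLoop]
  | cons k rest ih =>
    intro acc
    by_cases hk : k = ':'
    · subst hk; simp [pvTxtLoop]
    · have hkb : (k == ':') = false := beq_eq_false_iff_ne.mpr hk
      simp [pvTxtLoop, hkb, ih]

theorem takeWhile_of_no_colon (cs : List Char) (h : ':' ∉ cs) :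
    cs.takeWhile (fun k => !(k == ':')) = cs := by
  induction cs with
  | nil => rfl
  | cons k rest ih =>
    simp only [List.mem_cons, not_or] at h
    have hkb : (k == ':') = false := beq_eq_false_iff_ne.mpr (Ne.symm h.1)
    simp [hkb, ih h.2]

theorem singleton_infix_iff (a : Char) (l : List Char) : [a] <:+: l ↔ a ∈ l := by
  constructor
  · rintro ⟨s, t, rfl⟩; simp
  · intro h
    obtain ⟨s, t, rfl⟩ := List.append_of_mem h
    exact ⟨s, t, by simp⟩

theorem takeWhile_eq_take (cs : List Char) : ∀ n : Nat,
    [':'] <+: cs.drop n → (∀ i, i < n → ¬ [':'] <+: cs.drop i) →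
    cs.takeWhile (fun k => !(k == ':')) = cs.take n := by
  induction cs with
  | nil =>
    intro n h _
    simp at h
  | cons c rest ih =>
    intro n h hmin
    cases n with
    | zero =>
      simp only [List.drop_zero] at h
      obtain ⟨t, ht⟩ := h
      simp at ht
      simp [← ht.1]
    | succ n =>
      have hc : c ≠ ':' := by
        intro hc
        exact hmin 0 (Nat.succ_pos n) ⟨rest, by simp [hc]⟩
      have hkb : (c == ':') = false := beq_eq_false_iff_ne.mpr hc
      simp only [List.drop_succ_cons] at h
      have hr : rest.takeWhile (fun k => !(k == ':')) = rest.take n :=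
        ih n h (fun i hi => by
          have := hmin (i + 1) (Nat.succ_lt_succ hi)
          simpa using this)
      simp [hkb, hr]

-- a digit is not Python whitespace
set_option maxRecDepth 4000 in
theorem isdigit_not_isspace (c : Char) (h : PySem.Chars.isdigit c = true) :
    PySem.Chars.isspace c = false := by
  rw [PySem.Chars.isdigit, Bool.and_eq_true, decide_eq_true_eq, decide_eq_true_eq] at h
  have h0 : 48 ≤ c.toNat := by
    have h1 := h.1
    rw [Char.le_def, UInt32.le_iff_toNat_le] at h1
    exact h1
  have h9 : c.toNat ≤ 57 := by
    have h1 := h.2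
    rw [Char.le_def, UInt32.le_iff_toNat_le] at h1
    exact h1
  rw [PySem.Chars.isspace]
  simp only [Bool.or_eq_false_iff, Bool.and_eq_false_iff, decide_eq_false_iff_not]
  omega

-- unfolding equations for split₀'s worker
theorem go_nil (cur : List Char) (acc : List (List Char)) :
    PySem.Chars.split₀.go [] cur acc
      = if cur.isEmpty then acc.reverse else (cur.reverse :: acc).reverse := by
  rw [PySem.Chars.split₀.go.eq_def]

theorem go_cons (c : Char) (rest cur : List Char) (acc : List (List Char)) :
    PySem.Chars.split₀.go (c :: rest) cur acc
      = if PySem.Chars.isspace c then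
          (if cur.isEmpty then PySem.Chars.split₀.go rest [] acc
           else PySem.Chars.split₀.go rest [] (cur.reverse :: acc))
        else PySem.Chars.split₀.go rest (c :: cur) acc := by
  rw [PySem.Chars.split₀.go.eq_def]

-- the split₀ worker only appends to its accumulator
theorem split₀_go_acc (ds : List Char) : ∀ (cur : List Char) (acc : List (List Char)),
    PySem.Chars.split₀.go ds cur acc = acc.reverse ++ PySem.Chars.split₀.go ds cur [] := by
  induction ds with
  | nil =>
    intro cur acc
    rw [go_nil, go_nil]
    by_cases h : cur.isEmpty = true <;> simp [h]
  | cons c rest ih =>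
    intro cur acc
    rw [go_cons, go_cons]
    by_cases hs : PySem.Chars.isspace c = true
    · by_cases h : cur.isEmpty = true
      · simp only [hs, if_true, h]
        exact ih [] acc
      · simp only [hs, if_true, h, Bool.false_eq_true, if_false]
        rw [ih [] (cur.reverse :: acc), ih [] [cur.reverse]]
        simp
    · simp only [Bool.not_eq_true] at hs
      simp only [hs, Bool.false_eq_true, if_false]
      exact ih (c :: cur) acc

theorem pvIntDigits_snoc (g : List Char) (c : Char) :
    pvIntDigits (g ++ [c]) = pvIntDigits g * 10 + ((c.toNat : Int) - 48) := by
  simp [pvIntDigits, List.foldl_append]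

-- B's flushed loop total computes A's group sum, on digit/space-only input
theorem sum_invariant (ds : List Char) : ∀ (t : Int) (curL : List Char),
    (∀ c ∈ ds, PySem.Chars.isdigit c || c == ' ') →
    pvFlush (pvSumLoop ds (t, pvIntDigits curL.reverse, !curL.isEmpty))
      = t + ((PySem.Chars.split₀.go ds curL []).map pvIntDigits).sum := by
  induction ds with
  | nil =>
    intro t curL _
    rw [go_nil]
    cases curL with
    | nil => simp [pvSumLoop, pvFlush, pvIntDigits]
    | cons x xs => simp [pvSumLoop, pvFlush]
  | cons c rest ih =>
    intro t curL hall
    have hc : (PySem.Chars.isdigit c || c == ' ') = true := hall c (by simp)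
    have hrest : ∀ x ∈ rest, (PySem.Chars.isdigit x || x == ' ') = true :=
      fun x hx => hall x (List.mem_cons_of_mem c hx)
    rw [go_cons]
    rcases (Bool.or_eq_true _ _).mp hc with hd | hsp
    · -- digit character
      have hns := isdigit_not_isspace c hd
      rw [if_neg (by simp [hns])]
      have hstep : pvSumLoop (c :: rest) (t, pvIntDigits curL.reverse, !curL.isEmpty)
          = pvSumLoop rest (t, pvIntDigits curL.reverse * 10 + ((c.toNat : Int) - 48), true) := by
        simp [pvSumLoop, hd]
      rw [hstep]
      have h2 := ih t (c :: curL) hrest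
      simp only [List.reverse_cons, pvIntDigits_snoc, List.isEmpty_cons, Bool.not_false] at h2
      exact h2
    · -- space character
      have hceq : c = ' ' := by simpa using hsp
      subst hceq
      rw [if_pos (by decide)]
      have hdig : PySem.Chars.isdigit ' ' = false := by decide
      cases curL with
      | nil =>
        have hstep : pvSumLoop (' ' :: rest) (t, pvIntDigits ([] : List Char).reverse, !([] : List Char).isEmpty)
            = pvSumLoop rest (t, pvIntDigits ([] : List Char).reverse, !([] : List Char).isEmpty) := by
          simp [pvSumLoop, hdig, pvIntDigits]
        rw [hstep, if_pos (by simp)]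
        exact ih t [] hrest
      | cons x xs =>
        have hstep : pvSumLoop (' ' :: rest) (t, pvIntDigits (x :: xs).reverse, !(x :: xs).isEmpty)
            = pvSumLoop rest (t + pvIntDigits (x :: xs).reverse, pvIntDigits ([] : List Char).reverse, !([] : List Char).isEmpty) := by
          simp [pvSumLoop, hdig, pvIntDigits]
        rw [hstep, if_neg (by simp)]
        rw [split₀_go_acc rest [] [(x :: xs).reverse]]
        rw [ih (t + pvIntDigits (x :: xs).reverse) [] hrest]
        simp
        ring

-- the loop ignores everything but digits and spaces
theorem pvSumLoop_filter (cs : List Char) : ∀ st : Int × Int × Bool,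
    pvSumLoop cs st = pvSumLoop (cs.filter (fun k => PySem.Chars.isdigit k || k == ' ')) st := by
  induction cs with
  | nil => intro st; rfl
  | cons c rest ih =>
    intro st
    obtain ⟨t, cur, seen⟩ := st
    by_cases hd : PySem.Chars.isdigit c = true
    · simp [pvSumLoop, hd, List.filter, ih]
    · by_cases hs : c = ' '
      · subst hs
        simp [pvSumLoop, List.filter, hd, ih]
      · have hkb : (c == ' ') = false := beq_eq_false_iff_ne.mpr hs
        simp [pvSumLoop, List.filter, hd, hkb, ih]

-- ===== VERDICT (by name: the statement is the Claim_ definition above) =====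
theorem name_c_spec : Claim_equal_name_c := by
  intro text _
  unfold Spec_name_c
  have hA1 : (name_c text).1 = String.ofList (pvTxtLoop text.toList []) := rfl
  have hA2 : (name_c text).2
      = ((PySem.Chars.split₀ (text.toList.filter (fun k => PySem.Chars.isdigit k || k == ' '))).map pvIntDigits).sum := rfl
  have hB1 : (name_c_alt text).1
      = if PySem.Chars.find text.toList [':'] < 0 then text
        else String.ofList (PySem.Chars.slice text.toList none (some (PySem.Chars.find text.toList [':']))) := rfl
  have hB2 : (name_c_alt text).2 = pvFlush (pvSumLoop text.toList (0, 0, false)) := rfl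
  refine Prod.ext ?_ ?_
  · -- prefix component
    rw [hA1, hB1, pvTxtLoop_eq text.toList [], List.nil_append]
    by_cases hneg : PySem.Chars.find text.toList [':'] < 0
    · have hne : PySem.Chars.find text.toList [':'] = -1 := by
        have := PySem.Chars.neg_one_le_find text.toList [':']
        omega
      have hnot : ¬ [':'] <:+: text.toList := (PySem.Chars.find_eq_neg_one_iff text.toList [':']).mp hne
      have hnotmem : ':' ∉ text.toList := fun hm => hnot ((singleton_infix_iff ':' text.toList).mpr hm)
      rw [takeWhile_of_no_colon text.toList hnotmem, if_pos hneg]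
      simp [String.ofList_toList]
    · have hge : (0 : Int) ≤ PySem.Chars.find text.toList [':'] := by omega
      have hne : PySem.Chars.find text.toList [':'] ≠ -1 := by omega
      have hspec := PySem.Chars.findFrom_natCast_spec text.toList [':'] 0 (Nat.zero_le _) (by
        rw [show ((0 : Nat) : Int) = 0 from rfl, PySem.Chars.findFrom_zero]; exact hne)
      rw [show ((0 : Nat) : Int) = 0 from rfl, PySem.Chars.findFrom_zero] at hspec
      obtain ⟨-, hpre, hmin⟩ := hspec
      rw [takeWhile_eq_take text.toList (PySem.Chars.find text.toList [':']).toNat hpre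
        (fun i hi => hmin i (Nat.zero_le i) hi)]
      rw [if_neg hneg]
      rw [PySem.Chars.slice_eq_listSlice, PySem.List.slice_to text.toList hge]
  · -- sum component
    rw [hA2, hB2, pvSumLoop_filter text.toList (0, 0, false)]
    have hm := sum_invariant (text.toList.filter (fun k => PySem.Chars.isdigit k || k == ' ')) 0 []
      (fun c hc => (List.mem_filter.mp hc).2)
    simp only [List.reverse_nil, List.isEmpty_nil, Bool.not_true] at hm
    rw [show pvIntDigits ([] : List Char) = 0 from rfl] at hm
    rw [show PySem.Chars.split₀ (text.toList.filter (fun k => PySem.Chars.isdigit k || k == ' '))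
        = PySem.Chars.split₀.go (text.toList.filter (fun k => PySem.Chars.isdigit k || k == ' ')) [] [] from rfl]
    rw [hm]
    ring
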